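-- pv_equiv track=rewrite | github.com/Estel-lab/learn15112 | week3/hw3a.py | encodeRightLeftRouteCipher
-- ===== SOURCE A (Python) =====
-- def encodeRightLeftRouteCipher(text, rows):
--     free = rows - len(text) % rows
--     encode = ""
--
--     for i in range(free):
--         text += chr(122 - i)  # 122 is ascii of "z"
--
--     for i in range(0, rows):
--         if (i % 2 == 0):
--             encode += text[i:len(text):rows]
--         else:
--             encode += text[len(text) - rows + i:0:-rows]
--
--     encode = "%d" % rows + encode
--
--     return encode
-- ===== SOURCE B (Python) =====
-- def encodeRightLeftRouteCipher(text, rows):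
--     free = rows - len(text) % rows
--     padded = text + ''.join(chr(122 - i) for i in range(free))
--     m = len(padded) // rows
--     parts = [str(rows)]
--     for i in range(rows):
--         row = [padded[c * rows + i] for c in range(m)]
--         if i % 2:
--             row.reverse()
--         parts.append(''.join(row))
--     return ''.join(parts)
-- ===== Notes on version B (the rewrite author's own statement) =====
-- stated objective: alternative
-- what changed: A reads each cipher row by stride-slicing the padded string (a forward slice for even rows, a backward negative-step slice for odd rows); B builds an explicit column-major grid by direct indexing padded[c*rows+i] and emits each row, reversing odd rows, so no stride slices occur.
import Mathlib
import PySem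

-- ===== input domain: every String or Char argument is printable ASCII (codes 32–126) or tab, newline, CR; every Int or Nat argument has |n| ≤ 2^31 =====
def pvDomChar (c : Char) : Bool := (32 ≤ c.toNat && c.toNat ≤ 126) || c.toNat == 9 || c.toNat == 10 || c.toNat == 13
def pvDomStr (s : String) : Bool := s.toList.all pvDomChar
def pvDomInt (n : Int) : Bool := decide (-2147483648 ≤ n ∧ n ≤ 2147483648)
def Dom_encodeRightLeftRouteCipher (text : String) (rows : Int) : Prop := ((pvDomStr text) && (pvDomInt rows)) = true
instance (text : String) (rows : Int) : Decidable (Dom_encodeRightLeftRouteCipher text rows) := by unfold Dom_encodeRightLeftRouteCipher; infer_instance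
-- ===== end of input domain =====

-- B replaces A's per-row stride slicing (forward and backward string slices) by an explicit
-- column-major grid indexed with padded[c*rows+i]; objective: alternative (same cost, explicit 2D structure).

-- ===== PORT A =====
-- chr(k) ported as Char.ofNat k.toNat: exact for 0 ≤ k < 0x110000, which Pre_ guarantees (Python raises ValueError otherwise)
def encodeRightLeftRouteCipher (text : String) (rows : Int) : String :=
  let free : Int := rows - PySem.Int.mod (PySem.Str.len text) rows
  let t : List Char := (PySem.List.pyRange 0 free 1).foldl
    (fun (t : List Char) i => t ++ [Char.ofNat (122 - i).toNat]) text.toList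
  let encode : List Char := (PySem.List.pyRange 0 rows 1).foldl
    (fun (e : List Char) i =>
      if PySem.Int.mod i 2 == 0 then
        e ++ (PySem.List.slice? t (some i) (some (t.length : Int)) rows).getD []
      else
        e ++ (PySem.List.slice? t (some ((t.length : Int) - rows + i)) (some 0) (-rows)).getD [])
    []
  String.ofList (PySem.Int.toChars rows ++ encode)

-- ===== PORT B =====
-- padded[c*rows+i] ported as (pyGet? …).getD ' ': the index is always in range on Pre_ (Python raises IndexError otherwise)
def encodeRightLeftRouteCipher_alt (text : String) (rows : Int) : String :=
  let free : Int := rows - PySem.Int.mod (PySem.Str.len text) rows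
  let padded : List Char := text.toList ++ (PySem.List.pyRange 0 free 1).map (fun i => Char.ofNat (122 - i).toNat)
  let m : Int := PySem.Int.floordiv (padded.length : Int) rows
  let parts : List (List Char) := (PySem.List.pyRange 0 rows 1).foldl
    (fun (ps : List (List Char)) i =>
      let row : List Char := (PySem.List.pyRange 0 m 1).map
        (fun c => (PySem.List.pyGet? padded (c * rows + i)).getD ' ')
      ps ++ [if PySem.Int.mod i 2 == 0 then row else row.reverse])
    [PySem.Int.toChars rows]
  String.ofList (PySem.Chars.join [] parts)

-- ===== PRECONDITION & SPEC =====
-- Pre_ excludes exactly the inputs where the Python A raises: rows = 0 (ZeroDivisionError in len(text) % rows)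
-- and free = rows - len(text) % rows ≥ 124 (chr(122 - i) with a negative argument raises ValueError).
def Pre_encodeRightLeftRouteCipher (text : String) (rows : Int) : Prop :=
  rows ≠ 0 ∧ rows - PySem.Int.mod (PySem.Str.len text) rows ≤ 123
instance (text : String) (rows : Int) : Decidable (Pre_encodeRightLeftRouteCipher text rows) := by
  unfold Pre_encodeRightLeftRouteCipher; infer_instance
def pvWitness_encodeRightLeftRouteCipher : String × Int := ("attackatdawn", 3)
def Spec_encodeRightLeftRouteCipher (text : String) (rows : Int) (out : String) : Prop := out = encodeRightLeftRouteCipher_alt text rows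
instance (text : String) (rows : Int) (out : String) : Decidable (Spec_encodeRightLeftRouteCipher text rows out) := by unfold Spec_encodeRightLeftRouteCipher; infer_instance

-- ===== CLAIM (what is proved, stated in full; the proofs are below) =====
def Claim_equal_encodeRightLeftRouteCipher : Prop := ∀ (text : String) (rows : Int), Dom_encodeRightLeftRouteCipher text rows → Pre_encodeRightLeftRouteCipher text rows → Spec_encodeRightLeftRouteCipher text rows (encodeRightLeftRouteCipher text rows)

-- ===== LEMMAS AND PROOFS =====
lemma pvFilterMapRange {γ : Type} (f : Nat → Option γ) (g : Nat → γ) (m : Nat)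
    (h : ∀ k < m, f k = some (g k)) : (List.range m).filterMap f = (List.range m).map g := by
  induction m with
  | zero => simp
  | succ n ih =>
    rw [List.range_succ, List.filterMap_append, List.map_append,
        ih (fun k hk => h k (by omega))]
    simp [h n (by omega)]

lemma pvSliceEven (t : List Char) (R m' j : Nat) (hR : 0 < R) (hm : 1 ≤ m')
    (hn : t.length = m' * R) (hj : j < R) :
    PySem.List.slice? t (some (j:Int)) (some (t.length:Int)) (R:Int)
    = some ((List.range m').map (fun c => (t[c*R+j]?).getD ' ')) := by
  have hRne : (R:Int) ≠ 0 := by exact_mod_cast hR.ne'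
  simp only [PySem.List.slice?, PySem.List.sliceIndices, hn]
  rw [if_neg hRne]
  have h1 : min (j:Int) ((m'*R:Nat):Int) = (j:Int) := by
    apply min_eq_left; push_cast; nlinarith
  have hcnt : (((m'*R:Nat):Int) - j + R - 1) / R = m' := by
    have e : ((m'*R : Nat):Int) - j + R - 1 = ((R:Int) - 1 - j) + m' * R := by push_cast; ring
    rw [e, Int.add_mul_ediv_right _ _ hRne, Int.ediv_eq_zero_of_lt (by omega) (by omega)]
    simp
  have hRn : ¬((R:Int) < 0) := by omega
  have hjneg : ¬((j:Int) < 0) := by omega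
  have hnn : ¬(((m'*R:Nat):Int) < 0) := by omega
  have hR' : (0:Int) < R := by exact_mod_cast hR
  have hjlt : (j:Int) < ((m'*R:Nat):Int) := by push_cast; nlinarith
  simp only [if_neg hRn, if_neg hjneg, if_neg hnn, if_pos hR', min_self, h1, if_pos hjlt]
  rw [hcnt]
  simp only [Int.toNat_natCast]
  congr 1
  apply pvFilterMapRange
  intro k hk
  have hidx : (j:Int) + R * k = ((k * R + j : Nat):Int) := by push_cast; ring
  have hlt : k * R + j < t.length := by rw [hn]; nlinarith
  rw [hidx, Int.toNat_natCast, List.getElem?_eq_getElem hlt]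
  simp

lemma pvRangeRev (n : Nat) : (List.range n).reverse = (List.range n).map (fun k => n - 1 - k) := by
  apply List.ext_getElem
  · simp
  · intro i h1 h2
    simp [List.getElem_reverse]

lemma pvSliceOdd (t : List Char) (R m' j : Nat) (hR : 0 < R) (hm : 1 ≤ m')
    (hn : t.length = m' * R) (hj : j < R) (hj1 : 1 ≤ j) :
    PySem.List.slice? t (some ((t.length:Int) - R + j)) (some 0) (-(R:Int))
    = some (((List.range m').map (fun c => (t[c*R+j]?).getD ' ')).reverse) := by
  have hRne : ¬(-(R:Int) = 0) := by omega
  simp only [PySem.List.slice?, PySem.List.sliceIndices, hn]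
  rw [if_neg hRne]
  have hneg : (-(R:Int)) < 0 := by omega
  have hsx : ¬(((m'*R:Nat):Int) - R + j < 0) := by push_cast; nlinarith
  have hs1 : min (((m'*R:Nat):Int) - R + j) (((m'*R:Nat):Int) - 1) = ((m'*R:Nat):Int) - R + j := by
    apply min_eq_left; push_cast; omega
  have h0neg : ¬((0:Int) < 0) := by omega
  have h0min : min (0:Int) (((m'*R:Nat):Int) - 1) = 0 := by
    apply min_eq_left; push_cast; nlinarith
  have hnpos : ¬(0 < -(R:Int)) := by omega
  have hspos : (0:Int) < ((m'*R:Nat):Int) - R + j := by push_cast; nlinarith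
  have hcnt : ((((m'*R:Nat):Int) - R + j - 0 + - -(R:Int) - 1) / - -(R:Int)) = m' := by
    have e : (((m'*R:Nat):Int) - R + j - 0 + - -(R:Int) - 1) = ((j:Int) - 1) + m' * R := by push_cast; ring
    have e2 : - -((R:Int)) = (R:Int) := by ring
    rw [e, e2, Int.add_mul_ediv_right _ _ (by omega : (R:Int) ≠ 0),
        Int.ediv_eq_zero_of_lt (by omega) (by omega)]
    simp
  simp only [if_pos hneg, if_neg hsx, if_neg h0neg, hs1, h0min, if_neg hnpos, if_pos hspos, hcnt]
  rw [Int.toNat_natCast]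
  congr 1
  rw [← List.map_reverse, pvRangeRev, List.map_map]
  apply pvFilterMapRange
  intro k hk
  have hidx : ((m'*R:Nat):Int) - R + j + -(R:Int) * k = (((m' - 1 - k) * R + j : Nat):Int) := by
    push_cast [Nat.sub_sub]
    have h1k : (1:Int) + k ≤ m' := by omega
    rw [Nat.cast_sub (by omega)]
    push_cast
    ring
  have hlt : (m' - 1 - k) * R + j < t.length := by
    rw [hn]
    have : m' - 1 - k < m' := by omega
    nlinarith
  rw [hidx, Int.toNat_natCast, List.getElem?_eq_getElem hlt]
  simp [List.getElem?_eq_getElem hlt]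

lemma pvRangeNonpos (b : Int) (h : b ≤ 0) : PySem.List.pyRange 0 b 1 = [] := by
  simp [PySem.List.pyRange]
  omega

lemma pvJoinNil (l : List (List Char)) : PySem.Chars.join [] l = l.flatten := by
  induction l with
  | nil => simp [PySem.Chars.join_nil]
  | cons a t ih =>
    cases t with
    | nil => simp [PySem.Chars.join_singleton]
    | cons b r => rw [PySem.Chars.join_cons_cons]; simp [ih]

lemma pvFoldIf {α : Type} (p : α → Bool) (f g : α → List Char) (l : List α) (acc : List Char) :
    l.foldl (fun acc x => if p x = true then acc ++ f x else acc ++ g x) acc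
    = acc ++ l.flatMap (fun x => if p x = true then f x else g x) := by
  have h : (fun (acc : List Char) x => if p x = true then acc ++ f x else acc ++ g x)
      = (fun acc x => acc ++ (if p x = true then f x else g x)) := by
    funext a x; split <;> rfl
  rw [h, PySem.List.foldl_append_eq_flatMap]

theorem encodeRightLeftRouteCipher_spec : Claim_equal_encodeRightLeftRouteCipher := by
  intro text rows _ hpre
  obtain ⟨hne, -⟩ := hpre
  unfold Spec_encodeRightLeftRouteCipher encodeRightLeftRouteCipher encodeRightLeftRouteCipher_alt
  simp only []
  rcases lt_or_gt_of_ne hne with hneg | hpos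
  · -- rows < 0: both loops are empty
    have hfree : rows - PySem.Int.mod (PySem.Str.len text) rows ≤ 0 :=
      by have := (PySem.Int.mod_neg_bounds (PySem.Str.len text) hneg).1; omega
    rw [pvRangeNonpos _ hfree, pvRangeNonpos rows (by omega)]
    simp [PySem.Chars.join_singleton]
  · -- rows > 0
    lift rows to Nat using hpos.le with R hRcast
    have hR : 0 < R := by exact_mod_cast hpos
    have hlen : PySem.Str.len text = (text.toList.length : Int) := by
      simp [PySem.Str.len_eq]
    set n0 := text.toList.length with hn0
    have hmod : PySem.Int.mod (PySem.Str.len text) (R:Int) = ((n0 % R : Nat) : Int) := by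
      rw [hlen, PySem.Int.mod_natCast]
    have hfree : (R:Int) - PySem.Int.mod (PySem.Str.len text) (R:Int) = ((R - n0 % R : Nat) : Int) := by
      rw [hmod]; have := Nat.mod_lt n0 hR; push_cast [Nat.cast_sub (Nat.mod_lt n0 hR).le]; ring
    set f := R - n0 % R with hf
    set t : List Char := text.toList ++ (PySem.List.pyRange 0 ((f:Nat):Int) 1).map
        (fun i => Char.ofNat (122 - i).toNat) with ht
    set m' := n0 / R + 1 with hm'
    have htlen : t.length = m' * R := by
      rw [ht, List.length_append, List.length_map, PySem.List.pyRange_zero_natCast,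
          List.length_map, List.length_range]
      have h2 : n0 % R ≤ R := (Nat.mod_lt n0 hR).le
      calc n0 + f = R * (n0 / R) + n0 % R + (R - n0 % R) := by rw [Nat.div_add_mod]
        _ = R * (n0 / R) + (n0 % R + (R - n0 % R)) := by rw [Nat.add_assoc]
        _ = R * (n0 / R) + R := by rw [Nat.add_sub_cancel' h2]
        _ = m' * R := by rw [hm']; ring
    have hm1 : 1 ≤ m' := hm' ▸ Nat.le_add_left 1 _
    have hmdiv : PySem.Int.floordiv ((t.length : Nat) : Int) ((R:Nat):Int) = ((m' : Nat) : Int) := by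
      rw [PySem.Int.floordiv_natCast, htlen, Nat.mul_div_cancel _ hR]
    rw [hfree, PySem.List.foldl_append_singleton_eq_map, ← ht, pvFoldIf,
        PySem.List.foldl_append_eq_flatMap, pvJoinNil]
    rw [← List.map_eq_flatMap, List.singleton_append, List.flatten_cons,
        List.flatten_eq_flatMap, List.flatMap_map, List.nil_append]
    congr 1
    congr 1
    apply List.flatMap_congr
    intro i hi
    rw [PySem.List.mem_pyRange_one] at hi
    simp only [id_eq]
    lift i to Nat using hi.1 with j hj
    have hjR : j < R := by exact_mod_cast hi.2
    rw [hmdiv]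
    have hrow : (PySem.List.pyRange 0 ((m':Nat):Int) 1).map
        (fun c => (PySem.List.pyGet? t (c * (R:Int) + (j:Int))).getD ' ')
        = (List.range m').map (fun c => (t[c*R+j]?).getD ' ') := by
      rw [PySem.List.pyRange_zero_natCast, List.map_map]
      apply List.map_congr_left
      intro k hk
      have : (k:Int) * R + j = ((k * R + j : Nat) : Int) := by push_cast; ring
      simp only [Function.comp_apply, this, PySem.List.pyGet?_natCast]
    by_cases hpar : PySem.Int.mod (j:Int) 2 == 0
    · rw [if_pos hpar, if_pos hpar, hrow,
          pvSliceEven t R m' j hR hm1 htlen hjR]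
      rfl
    · have hj1 : 1 ≤ j := by
        rcases Nat.eq_zero_or_pos j with h0 | h; swap; · exact h
        exfalso; apply hpar; subst h0; decide
      rw [if_neg hpar, if_neg hpar, hrow,
          pvSliceOdd t R m' j hR hm1 htlen hjR hj1]
      rfl
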